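-- pv_equiv track=rewrite | github.com/ChLah/everybody-codes | 2024/quest_9/solution.py | get_min_counts
-- ===== SOURCE A (Python) =====
-- def get_min_counts(max_val: int, stamps: list[int])->list[int]:
--     min_counts = [max_val+1] * (max_val+1) # initialize array with maximum count needed
--     min_counts[0] = 0
--
--     for amount in range(1, max_val+1):
--         for stamp in stamps:
--             if amount >= stamp:
--                 min_counts[amount] = min(min_counts[amount], min_counts[amount-stamp]+1)
--
--     return min_counts
-- ===== SOURCE B (Python) =====
-- def get_min_counts(max_val: int, stamps: list[int]) -> list[int]:
--     inf = max_val + 1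
--     result = [inf] * (max_val + 1)
--     result[0] = 0
--     frontier = [0]  # BFS level-by-level: each stamp use is one unit-weight edge
--     for level in range(1, max_val + 1):
--         nxt = []
--         for a in frontier:
--             for s in stamps:
--                 b = a + s
--                 if 0 <= b <= max_val and result[b] == inf:
--                     result[b] = level
--                     nxt.append(b)
--         frontier = nxt
--     return result
-- ===== Notes on version B (the rewrite author's own statement) =====
-- stated objective: faster
-- what changed: Replaced the amount-major DP table relaxation by a level-synchronous BFS over amounts: starting from 0, each round adds every not-yet-seen amount reachable by one more stamp and labels it with the current level, so only discovered amounts are ever processed and each cell is written once instead of being re-minimised for every (amount, stamp) pair.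
import Mathlib
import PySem

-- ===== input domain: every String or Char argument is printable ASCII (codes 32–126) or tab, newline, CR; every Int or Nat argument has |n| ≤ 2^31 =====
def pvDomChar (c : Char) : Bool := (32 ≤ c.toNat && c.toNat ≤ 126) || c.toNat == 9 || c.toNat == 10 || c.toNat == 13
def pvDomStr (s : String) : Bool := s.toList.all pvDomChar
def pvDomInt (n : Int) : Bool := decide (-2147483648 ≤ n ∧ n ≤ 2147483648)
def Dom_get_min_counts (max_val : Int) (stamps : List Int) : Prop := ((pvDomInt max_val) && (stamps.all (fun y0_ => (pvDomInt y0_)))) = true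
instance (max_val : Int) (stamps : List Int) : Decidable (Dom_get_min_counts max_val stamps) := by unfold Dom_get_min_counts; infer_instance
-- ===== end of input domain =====

-- B replaces A's amount-major DP relaxation by a level-synchronous BFS from amount 0 (each stamp use is one
-- unit-weight edge; the first level that reaches an amount is its minimal stamp count); the proof shows the
-- BFS labels equal the DP minima.

-- ===== PORT A =====
-- Literal port of A; indexing via PySem pyGetD/pySetD (exact on Pre_, where every index is in range).
def get_min_counts (max_val : Int) (stamps : List Int) : List Int :=
  let mc := PySem.List.pySetD (List.replicate (max_val + 1).toNat (max_val + 1)) 0 0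
  (PySem.List.pyRange 1 (max_val + 1) 1).foldl (fun mc amount =>
    stamps.foldl (fun mc stamp =>
      if amount ≥ stamp then
        PySem.List.pySetD mc amount
          (min (PySem.List.pyGetD mc amount 0) (PySem.List.pyGetD mc (amount - stamp) 0 + 1))
      else mc) mc) mc

-- ===== PORT B =====
-- Literal port of Source B: state = (result, frontier); each level appends the newly discovered amounts.
def get_min_counts_alt (max_val : Int) (stamps : List Int) : List Int :=
  let result := PySem.List.pySetD (List.replicate (max_val + 1).toNat (max_val + 1)) 0 0
  ((PySem.List.pyRange 1 (max_val + 1) 1).foldl (fun (st : List Int × List Int) level =>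
    st.2.foldl (fun (st2 : List Int × List Int) a =>
      stamps.foldl (fun (st2 : List Int × List Int) s =>
        if 0 ≤ a + s ∧ a + s ≤ max_val ∧ PySem.List.pyGetD st2.1 (a + s) 0 = max_val + 1 then
          (PySem.List.pySetD st2.1 (a + s) level, st2.2 ++ [a + s])
        else st2) st2) (st.1, ([] : List Int))) (result, [0])).1

-- ===== PRECONDITION & SPEC =====
-- Pre_ excludes exactly the inputs where A raises an IndexError: max_val < 0 ('[x]*(max_val+1)' is empty, so
-- 'min_counts[0] = 0' fails), and a negative stamp together with max_val ≥ 1 ('min_counts[amount-stamp]' indexes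
-- past the end at amount = max_val). On every other input A returns normally.
def Pre_get_min_counts (max_val : Int) (stamps : List Int) : Prop :=
  0 ≤ max_val ∧ (max_val = 0 ∨ ∀ s ∈ stamps, 0 ≤ s)
instance (max_val : Int) (stamps : List Int) : Decidable (Pre_get_min_counts max_val stamps) := by
  unfold Pre_get_min_counts; infer_instance

def pvWitness_get_min_counts : Int × List Int := (5, [1, 3])

def Spec_get_min_counts (max_val : Int) (stamps : List Int) (out : List Int) : Prop := out = get_min_counts_alt max_val stamps
instance (max_val : Int) (stamps : List Int) (out : List Int) : Decidable (Spec_get_min_counts max_val stamps out) := by unfold Spec_get_min_counts; infer_instance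

-- ===== CLAIM (what is proved, stated in full; the proofs are below) =====
def Claim_equal_get_min_counts : Prop := ∀ (max_val : Int) (stamps : List Int), Dom_get_min_counts max_val stamps → Pre_get_min_counts max_val stamps → Spec_get_min_counts max_val stamps (get_min_counts max_val stamps)

-- ===== LEMMAS AND PROOFS =====

-- 'Reach S k a': a is the sum of some k-element list of values drawn from S (stamps, with repetition).
def Reach (S : List Int) (k : ℕ) (a : Int) : Prop :=
  ∃ l : List Int, (∀ x ∈ l, x ∈ S) ∧ l.length = k ∧ l.sum = a

-- the value A's table holds for amount a: the minimal stamp count, capped by the sentinel M (unused cap when reachable).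
noncomputable def mval (M : Int) (S : List Int) (a : Int) : Int :=
  @dite Int (∃ k, Reach S k a) (Classical.propDecidable _)
    (fun _ => min (((sInf {k | Reach S k a} : ℕ) : ℤ)) M)
    (fun _ => M)

def stArr (n : ℕ) (f : ℕ → Int) : List Int := (List.range n).map f

theorem reach_zero (S : List Int) (a : Int) : Reach S 0 a ↔ a = 0 := by
  constructor
  · rintro ⟨l, -, hlen, hsum⟩
    have : l = [] := List.length_eq_zero_iff.mp hlen
    simp [this] at hsum; omega
  · rintro rfl; exact ⟨[], by simp, rfl, rfl⟩

theorem reach_succ (S : List Int) (k : ℕ) (a : Int) :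
    Reach S (k + 1) a ↔ ∃ s ∈ S, Reach S k (a - s) := by
  constructor
  · rintro ⟨l, hmem, hlen, hsum⟩
    cases l with
    | nil => simp at hlen
    | cons x t =>
      refine ⟨x, hmem x (by simp), t, fun y hy => hmem y (by simp [hy]), by simpa using hlen, ?_⟩
      simp at hsum; omega
  · rintro ⟨s, hsS, l, hmem, hlen, hsum⟩
    refine ⟨s :: l, ?_, by simp [hlen], by simp [hsum]⟩
    intro x hx
    rcases List.mem_cons.mp hx with rfl | hx
    · exact hsS
    · exact hmem x hx

theorem length_le_sum {l : List Int} (h : ∀ x ∈ l, (1:Int) ≤ x) : (l.length : Int) ≤ l.sum := by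
  induction l with
  | nil => simp
  | cons x t ih =>
    have hx := h x (by simp)
    have ht := ih (fun y hy => h y (by simp [hy]))
    simp only [List.length_cons, List.sum_cons]
    push_cast
    omega

theorem sum_nonneg_list {l : List Int} (h : ∀ x ∈ l, (0:Int) ≤ x) : 0 ≤ l.sum := by
  induction l with
  | nil => simp
  | cons x t ih =>
    have hx := h x (by simp)
    have ht := ih (fun y hy => h y (by simp [hy]))
    simp only [List.sum_cons]
    omega

theorem filter_pos_sum {l : List Int} (h : ∀ x ∈ l, (0:Int) ≤ x) :
    (l.filter (fun x => decide (1 ≤ x))).sum = l.sum := by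
  induction l with
  | nil => rfl
  | cons x t ih =>
    have hx := h x (by simp)
    have ht := ih (fun y hy => h y (by simp [hy]))
    by_cases hx1 : (1:Int) ≤ x
    · simp only [List.filter_cons, hx1, decide_true, if_pos, List.sum_cons, ht]
    · have hx0 : x = 0 := by omega
      simp only [List.filter_cons, hx1, decide_false, List.sum_cons]
      simp [hx0, ht]

-- from any witness over nonnegative stamps, a no-shorter all-positive witness with the same sum
theorem pos_witness {S : List Int} (hS : ∀ s ∈ S, (0:Int) ≤ s) {k : ℕ} {a : Int}
    (h : Reach S k a) :
    ∃ j ≤ k, ∃ l : List Int, (∀ x ∈ l, x ∈ S) ∧ (∀ x ∈ l, (1:Int) ≤ x) ∧ l.length = j ∧ l.sum = a := by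
  obtain ⟨l, hmem, hlen, hsum⟩ := h
  refine ⟨(l.filter (fun x => decide (1 ≤ x))).length, ?_, l.filter (fun x => decide (1 ≤ x)),
    fun x hx => hmem x (List.mem_of_mem_filter hx),
    fun x hx => by simpa using (List.of_mem_filter hx), rfl, ?_⟩
  · calc (l.filter (fun x => decide (1 ≤ x))).length ≤ l.length := List.length_filter_le _ _
      _ = k := hlen
  · rw [filter_pos_sum (fun x hx => hS x (hmem x hx)), hsum]

theorem sInf_reach_le {S : List Int} (hS : ∀ s ∈ S, (0:Int) ≤ s) {a : Int}
    (hex : ∃ k, Reach S k a) : ((sInf {k | Reach S k a} : ℕ) : ℤ) ≤ a := by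
  obtain ⟨k, hk⟩ := hex
  obtain ⟨j, hjk, l, hmemS, hpos, hlen, hsum⟩ := pos_witness hS hk
  have hR : Reach S j a := ⟨l, hmemS, hlen, hsum⟩
  have h1 : sInf {k | Reach S k a} ≤ j := Nat.sInf_le hR
  have h2 : (j : Int) ≤ a := by
    rw [← hsum, ← hlen]; exact length_le_sum hpos
  calc ((sInf {k | Reach S k a} : ℕ) : ℤ) ≤ (j : ℤ) := by exact_mod_cast h1
    _ ≤ a := h2

theorem mval_le {M : Int} (S : List Int) (a : Int) : mval M S a ≤ M := by
  unfold mval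
  split
  · exact min_le_right _ _
  · exact le_refl _

theorem mval_nonneg {M : Int} (S : List Int) (a : Int) (hM : 0 ≤ M) : 0 ≤ mval M S a := by
  unfold mval
  split
  · exact le_min (by positivity) hM
  · exact hM

theorem mval_of_not_reach {M : Int} {S : List Int} {a : Int} (h : ¬ ∃ k, Reach S k a) :
    mval M S a = M := by
  unfold mval
  rw [dif_neg h]

theorem mval_of_reach {M : Int} {S : List Int} {a : Int} (hS : ∀ s ∈ S, (0:Int) ≤ s)
    (hex : ∃ k, Reach S k a) (haM : a < M) :
    mval M S a = ((sInf {k | Reach S k a} : ℕ) : ℤ) := by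
  unfold mval
  rw [dif_pos hex]
  have := sInf_reach_le hS hex
  omega

theorem mval_zero {M : Int} (S : List Int) (hM : 0 ≤ M) : mval M S 0 = 0 := by
  have hex : ∃ k, Reach S k 0 := ⟨0, (reach_zero S 0).mpr rfl⟩
  unfold mval
  rw [dif_pos hex]
  have h0 : (0:ℕ) ∈ {k | Reach S k 0} := (reach_zero S 0).mpr rfl
  have := Nat.sInf_le h0
  have : sInf {k | Reach S k 0} = 0 := by omega
  rw [this]; simpa using hM

theorem mval_le_of_reach {M : Int} {S : List Int} {a : Int} {k : ℕ} (h : Reach S k a) :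
    mval M S a ≤ (k : ℤ) := by
  unfold mval
  rw [dif_pos ⟨k, h⟩]
  have : sInf {k | Reach S k a} ≤ k := Nat.sInf_le h
  calc min ((sInf {k | Reach S k a} : ℕ) : ℤ) M ≤ ((sInf {k | Reach S k a} : ℕ) : ℤ) := min_le_left _ _
    _ ≤ (k : ℤ) := by exact_mod_cast this

-- if the BFS label is below the cap, the amount is reachable in exactly that many stamps
theorem reach_of_mval {M : Int} {S : List Int} {a ℓ : Int}
    (h : mval M S a = ℓ) (hℓ : ℓ < M) : 0 ≤ ℓ ∧ Reach S ℓ.toNat a := by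
  unfold mval at h
  split at h
  · next hex =>
    have hne : {k | Reach S k a}.Nonempty := hex
    have hmem : Reach S (sInf {k | Reach S k a}) a := Nat.sInf_mem hne
    have hval : ((sInf {k | Reach S k a} : ℕ) : ℤ) = ℓ := by
      rcases le_total (((sInf {k | Reach S k a} : ℕ) : ℤ)) M with hle | hle
      · rw [min_eq_left hle] at h; exact h
      · rw [min_eq_right hle] at h; omega
    constructor
    · omega
    · have : ℓ.toNat = sInf {k | Reach S k a} := by omega
      rw [this]; exact hmem
  · omega

-- Bellman attainment: a reachable positive amount has a last stamp
theorem mval_attained {M : Int} {S : List Int} (hS : ∀ s ∈ S, (0:Int) ≤ s)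
    {a : Int} (ha : 1 ≤ a) (haM : a < M) :
    mval M S a = M ∨ ∃ s ∈ S, 1 ≤ s ∧ s ≤ a ∧ mval M S a = mval M S (a - s) + 1 := by
  by_cases hex : ∃ k, Reach S k a
  · right
    have hne : {k | Reach S k a}.Nonempty := hex
    have hmem : Reach S (sInf {k | Reach S k a}) a := Nat.sInf_mem hne
    obtain ⟨j, hjm, l, hmemS, hpos, hlen, hsum⟩ := pos_witness hS hmem
    have hjr : Reach S j a := ⟨l, hmemS, hlen, hsum⟩
    have hmj : sInf {k | Reach S k a} ≤ j := Nat.sInf_le hjr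
    have hjm' : j = sInf {k | Reach S k a} := le_antisymm hjm hmj
    have hm1 : 1 ≤ j := by
      rcases Nat.eq_zero_or_pos j with h0 | h
      · exfalso
        have : Reach S 0 a := h0 ▸ hjr
        have := (reach_zero S a).mp this
        omega
      · exact h
    cases l with
    | nil => simp at hlen; omega
    | cons x t =>
      have hxS : x ∈ S := hmemS x (by simp)
      have hx1 : (1:Int) ≤ x := hpos x (by simp)
      have htsum : t.sum = a - x := by simp at hsum; omega
      have ht0 : 0 ≤ t.sum := sum_nonneg_list (fun y hy => le_trans (by norm_num) (hpos y (by simp [hy])))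
      have htlen : t.length = j - 1 := by simp at hlen; omega
      have hrt : Reach S (j - 1) (a - x) := ⟨t, fun y hy => hmemS y (by simp [hy]), htlen, htsum⟩
      refine ⟨x, hxS, hx1, by omega, ?_⟩
      have hne2 : {k | Reach S k (a - x)}.Nonempty := ⟨j - 1, hrt⟩
      have hmem2 : Reach S (sInf {k | Reach S k (a - x)}) (a - x) := Nat.sInf_mem hne2
      have hup : Reach S (sInf {k | Reach S k (a - x)} + 1) a :=
        (reach_succ S _ a).mpr ⟨x, hxS, hmem2⟩
      have hlow : sInf {k | Reach S k a} ≤ sInf {k | Reach S k (a - x)} + 1 := Nat.sInf_le hup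
      have hhigh : sInf {k | Reach S k (a - x)} ≤ j - 1 := Nat.sInf_le hrt
      have e1 : mval M S a = ((sInf {k | Reach S k a} : ℕ) : ℤ) := mval_of_reach hS hex haM
      have e2 : mval M S (a - x) = ((sInf {k | Reach S k (a - x)} : ℕ) : ℤ) :=
        mval_of_reach hS ⟨j - 1, hrt⟩ (by omega)
      rw [e1, e2]
      have : sInf {k | Reach S k a} = sInf {k | Reach S k (a - x)} + 1 := by omega
      rw [this]; push_cast; ring
  · left; exact mval_of_not_reach hex

-- every value is either the sentinel or at most the amount itself
theorem mval_cases {M : Int} {S : List Int} (hS : ∀ s ∈ S, (0:Int) ≤ s) (a : Int) :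
    mval M S a = M ∨ mval M S a ≤ a := by
  by_cases hex : ∃ k, Reach S k a
  · right
    unfold mval
    rw [dif_pos hex]
    have := sInf_reach_le hS hex
    exact le_trans (min_le_left _ _) this
  · left; exact mval_of_not_reach hex

-- the BFS label of a one-stamp successor is at most one more
theorem mval_succ_le {M : Int} {S : List Int} {a s ℓ : Int} (hsS : s ∈ S)
    (h : mval M S a = ℓ) (hℓ : ℓ < M) : mval M S (a + s) ≤ ℓ + 1 := by
  obtain ⟨hℓ0, hr⟩ := reach_of_mval h hℓ
  have : Reach S (ℓ.toNat + 1) (a + s) := (reach_succ S _ _).mpr ⟨s, hsS, by simpa using hr⟩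
  have := mval_le_of_reach (M := M) this
  push_cast at this
  omega

-- mval = 0 only at amount 0
theorem mval_eq_zero {M : Int} {S : List Int} {a : Int} (hM : 0 < M)
    (h : mval M S a ≤ 0) : a = 0 := by
  have h0 : mval M S a = 0 := le_antisymm h (mval_nonneg S a (by omega))
  obtain ⟨-, hr⟩ := reach_of_mval h0 (by omega)
  simpa using (reach_zero S a).mp (by simpa using hr)

-- stArr toolbox
theorem stArr_congr {n : ℕ} {f g : ℕ → Int} (h : ∀ i < n, f i = g i) : stArr n f = stArr n g := by
  unfold stArr
  apply List.ext_getElem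
  · simp
  · intro i h1 h2
    simp only [List.getElem_map, List.getElem_range]
    exact h i (by simpa using h1)

theorem stArr_getD {n i : ℕ} (h : i < n) (f : ℕ → Int) : (stArr n f).getD i 0 = f i := by
  unfold stArr
  rw [List.getD_eq_getElem?_getD]
  rw [List.getElem?_eq_getElem (by simpa using h)]
  simp

theorem stArr_set {n i : ℕ} (h : i < n) (f : ℕ → Int) (v : Int) :
    (stArr n f).set i v = stArr n (fun j => if j = i then v else f j) := by
  unfold stArr
  apply List.ext_getElem
  · simp
  · intro j h1 h2
    by_cases hji : j = i
    · subst hji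
      rw [List.getElem_set_self (by simpa using h1)]
      simp
    · rw [List.getElem_set_ne (by omega)]
      simp [hji]

-- generic bounded-min fold lemmas (used for A's inner loop)
theorem foldl_le_init {α : Type} {l : List α} {f : Int → α → Int}
    (h : ∀ v s, f v s ≤ v) (init : Int) : l.foldl f init ≤ init := by
  induction l generalizing init with
  | nil => simp
  | cons x t ih => exact le_trans (ih (f init x)) (h init x)

theorem foldl_lb {α : Type} {l : List α} {f : Int → α → Int} {c init : Int}
    (h : ∀ v, ∀ s ∈ l, c ≤ v → c ≤ f v s) (hinit : c ≤ init) : c ≤ l.foldl f init := by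
  induction l generalizing init with
  | nil => simpa
  | cons x t ih =>
    exact ih (fun v s hs hc => h v s (by simp [hs]) hc) (h init x (by simp) hinit)

theorem foldl_le_mem {α : Type} {l : List α} {f : Int → α → Int} {s₀ : α} (hs : s₀ ∈ l)
    (h : ∀ v s, f v s ≤ v) {c : Int} (h2 : ∀ v, f v s₀ ≤ c) (init : Int) :
    l.foldl f init ≤ c := by
  induction l generalizing init with
  | nil => simp at hs
  | cons x t ih =>
    simp only [List.foldl_cons]
    rcases List.mem_cons.mp hs with rfl | hx
    · exact le_trans (foldl_le_init h _) (h2 init)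
    · exact ih hx (f init x)

theorem init_eq (n : ℕ) (M : Int) (hn : 1 ≤ n) :
    PySem.List.pySetD (List.replicate n M) 0 0 = stArr n (fun i => if i = 0 then 0 else M) := by
  rw [PySem.List.pySetD_of_nonneg _ _ (by norm_num)]
  rw [Int.toNat_zero]
  apply List.ext_getElem
  · simp [stArr]
  · intro i h1 h2
    simp only [stArr, List.getElem_map, List.getElem_range]
    by_cases hi : i = 0
    · subst hi
      rw [List.getElem_set_self (by simpa using h1)]
      simp
    · rw [List.getElem_set_ne (by omega)]
      simp [hi]

-- Bellman upper bound, used by A's analysis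
theorem mval_le_shift {M : Int} {S : List Int} (hS : ∀ s ∈ S, (0:Int) ≤ s)
    {a s : Int} (hs : s ∈ S) (hs1 : 1 ≤ s) (hsa : s ≤ a) (haM : a < M) :
    mval M S a ≤ mval M S (a - s) + 1 := by
  by_cases hex : ∃ k, Reach S k (a - s)
  · have hne : {k | Reach S k (a - s)}.Nonempty := hex
    have hmem : Reach S (sInf {k | Reach S k (a - s)}) (a - s) := Nat.sInf_mem hne
    have hra : Reach S (sInf {k | Reach S k (a - s)} + 1) a :=
      (reach_succ S _ a).mpr ⟨s, hs, hmem⟩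
    have h1 : mval M S a ≤ ((sInf {k | Reach S k (a - s)} : ℕ) : ℤ) + 1 := by
      have := mval_le_of_reach (M := M) hra; push_cast at this; omega
    have h2 : mval M S (a - s) = ((sInf {k | Reach S k (a - s)} : ℕ) : ℤ) :=
      mval_of_reach hS hex (by omega)
    omega
  · rw [mval_of_not_reach hex]
    have := mval_le (M := M) S a
    omega

-- the inner stamp loop of A at a fixed amount only rewrites the cell at that amount
theorem innerA (S' : List Int) (hS' : ∀ s ∈ S', (0:Int) ≤ s)
    (n : ℕ) (f : ℕ → Int) (a : Int) (ha1 : 1 ≤ a) (han : a.toNat < n) (v : Int) :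
    S'.foldl (fun mc stamp =>
      if a ≥ stamp then
        PySem.List.pySetD mc a
          (min (PySem.List.pyGetD mc a 0) (PySem.List.pyGetD mc (a - stamp) 0 + 1))
      else mc) (stArr n (fun j => if j = a.toNat then v else f j))
    = stArr n (fun j => if j = a.toNat then
        S'.foldl (fun w s => if 1 ≤ s ∧ s ≤ a then min w (f (a - s).toNat + 1) else w) v
      else f j) := by
  induction S' generalizing v with
  | nil => rfl
  | cons s t ih =>
    have hs0 : (0:Int) ≤ s := hS' s (by simp)
    have ht : ∀ x ∈ t, (0:Int) ≤ x := fun x hx => hS' x (by simp [hx])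
    simp only [List.foldl_cons]
    by_cases hsa : a ≥ s
    · rw [if_pos hsa]
      rw [PySem.List.pyGetD_of_nonneg _ _ (by omega), PySem.List.pyGetD_of_nonneg _ _ (by omega : (0:Int) ≤ a - s)]
      rw [stArr_getD han, stArr_getD (show (a - s).toNat < n by omega)]
      rw [if_pos rfl]
      rw [PySem.List.pySetD_of_nonneg _ _ (by omega : (0:Int) ≤ a)]
      rw [stArr_set han]
      by_cases hs1 : (1:Int) ≤ s
      · have hne : (a - s).toNat ≠ a.toNat := by omega
        rw [if_neg hne]
        rw [stArr_congr (g := fun j => if j = a.toNat then min v (f (a - s).toNat + 1) else f j)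
          (by intro i hi; by_cases h : i = a.toNat <;> simp [h])]
        rw [ih ht]
        rw [if_pos ⟨hs1, hsa⟩]
      · have hs00 : s = 0 := by omega
        subst hs00
        simp only [sub_zero, if_true]
        have hmin : min v (v + 1) = v := min_eq_left (by omega)
        rw [hmin]
        rw [stArr_congr (g := fun j => if j = a.toNat then v else f j)
          (by intro i hi; by_cases h : i = a.toNat <;> simp [h])]
        have hcond : ¬ ((1:Int) ≤ 0 ∧ (0:Int) ≤ a) := by omega
        rw [if_neg hcond]
        rw [ih ht]
    · have hcond : ¬ ((1:Int) ≤ s ∧ s ≤ a) := by omega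
      rw [if_neg hsa, if_neg hcond, ih ht]

-- the value A's inner loop folds up is exactly the capped minimal stamp count
theorem fold_min_value (M : Int) (S : List Int) (hS : ∀ s ∈ S, (0:Int) ≤ s)
    (a : Int) (ha : 1 ≤ a) (haM : a < M) :
    S.foldl (fun w s => if 1 ≤ s ∧ s ≤ a then min w (mval M S (a - s) + 1) else w) M
      = mval M S a := by
  apply le_antisymm
  · rcases mval_attained hS ha haM with hM | ⟨s, hsS, hs1, hsa, heq⟩
    · rw [hM]
      exact foldl_le_init (fun w s => by split <;> simp) M
    · refine foldl_le_mem hsS (fun w s => by split <;> simp) ?_ M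
      intro w
      rw [if_pos ⟨hs1, hsa⟩, ← heq]
      exact min_le_right _ _
  · refine foldl_lb ?_ (mval_le S a)
    intro w s hsS hc
    split
    · next h => exact le_min hc (mval_le_shift hS hsS h.1 h.2 haM)
    · exact hc

-- A's outer loop: amounts processed so far hold their final value, the rest the sentinel
theorem outerA (max_val : Int) (S : List Int) (hS : ∀ s ∈ S, (0:Int) ≤ s)
    (d : ℕ) : ∀ a : Int, 1 ≤ a → a + d = max_val + 1 →
    (PySem.List.pyRange a (max_val + 1) 1).foldl (fun mc amount =>
        S.foldl (fun mc stamp =>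
          if amount ≥ stamp then
            PySem.List.pySetD mc amount
              (min (PySem.List.pyGetD mc amount 0) (PySem.List.pyGetD mc (amount - stamp) 0 + 1))
          else mc) mc)
      (stArr (max_val + 1).toNat (fun i => if (i : Int) < a then mval (max_val + 1) S (i : Int) else max_val + 1))
    = stArr (max_val + 1).toNat (fun i => mval (max_val + 1) S (i : Int)) := by
  induction d with
  | zero =>
    intro a ha1 had
    rw [PySem.List.pyRange_one_eq_nil (by omega)]
    rw [List.foldl_nil]
    exact stArr_congr (by intro i hi; simp only [if_pos (show (i:Int) < a by omega)])
  | succ d ih =>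
    intro a ha1 had
    rw [PySem.List.pyRange_one_cons (by omega)]
    rw [List.foldl_cons]
    have han : a.toNat < (max_val + 1).toNat := by omega
    rw [stArr_congr (g := fun j => if j = a.toNat then (max_val + 1) else
          (if (j : Int) < a then mval (max_val + 1) S (j : Int) else max_val + 1))
        (by intro i hi
            by_cases h : i = a.toNat
            · subst h
              have hna : ¬ ((a.toNat : Int) < a) := by omega
              simp [hna]
            · simp [h])]
    rw [innerA S hS _ _ a ha1 han (max_val + 1)]
    have hfold : (S.foldl (fun w s => if 1 ≤ s ∧ s ≤ a then
        min w ((if (((a - s).toNat : ℕ) : Int) < a then mval (max_val + 1) S (((a - s).toNat : ℕ) : Int) else max_val + 1) + 1) else w) (max_val + 1))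
        = mval (max_val + 1) S a := by
      rw [PySem.List.foldl_congr_mem (g := fun w s => if 1 ≤ s ∧ s ≤ a then min w (mval (max_val + 1) S (a - s) + 1) else w)]
      · exact fold_min_value (max_val + 1) S hS a ha1 (by omega)
      · intro w s hsS
        dsimp only
        by_cases h : (1:Int) ≤ s ∧ s ≤ a
        · rw [if_pos h, if_pos h]
          have h1 : (((a - s).toNat : ℕ) : Int) = a - s := by omega
          rw [h1, if_pos (by omega)]
        · rw [if_neg h, if_neg h]
    rw [hfold]
    rw [stArr_congr (g := fun i => if (i : Int) < a + 1 then mval (max_val + 1) S (i : Int) else max_val + 1)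
        (by intro i hi
            by_cases h : i = a.toNat
            · subst h
              have hlt : ((a.toNat : Int)) < a + 1 := by omega
              simp [hlt]
              rw [if_pos (show (0:Int) ≤ a by omega)]
              congr 1
              omega
            · simp only [if_neg h]
              by_cases h2 : (i : Int) < a
              · rw [if_pos h2, if_pos (by omega)]
              · rw [if_neg h2, if_neg (by omega)])]
    exact ih (a + 1) (by omega) (by omega)

-- ===== BFS (B-side) lemmas =====
-- the BFS array after discovering exactly the set 'seen' at level ℓ+1, everything at level ≤ ℓ final
-- (represented by the function fed to stArr below)

-- one amount's stamp scan: appends exactly the fresh one-step successors at level ℓ+1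
theorem bfs_stamps (max_val : Int) (S : List Int) (ℓ : Int) (hl0 : 0 ≤ ℓ) (hlm : ℓ < max_val)
    (a : Int) (haP : 0 ≤ a ∧ a ≤ max_val ∧ mval (max_val + 1) S a = ℓ) :
    ∀ (S' : List Int), (∀ s ∈ S', s ∈ S) →
    ∀ (nxt : List Int), (∀ b ∈ nxt, 0 ≤ b ∧ b ≤ max_val ∧ mval (max_val + 1) S b = ℓ + 1) → nxt.Nodup →
    ∃ nxt' : List Int,
      S'.foldl (fun (st2 : List Int × List Int) s =>
          if 0 ≤ a + s ∧ a + s ≤ max_val ∧ PySem.List.pyGetD st2.1 (a + s) 0 = max_val + 1 then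
            (PySem.List.pySetD st2.1 (a + s) (ℓ + 1), st2.2 ++ [a + s])
          else st2)
        (stArr (max_val + 1).toNat (fun i => if mval (max_val + 1) S (i : Int) ≤ ℓ then mval (max_val + 1) S (i : Int) else if (i : Int) ∈ nxt then ℓ + 1 else max_val + 1), nxt)
      = (stArr (max_val + 1).toNat (fun i => if mval (max_val + 1) S (i : Int) ≤ ℓ then mval (max_val + 1) S (i : Int) else if (i : Int) ∈ nxt' then ℓ + 1 else max_val + 1), nxt')
      ∧ (∀ b ∈ nxt', 0 ≤ b ∧ b ≤ max_val ∧ mval (max_val + 1) S b = ℓ + 1) ∧ nxt'.Nodup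
      ∧ (∀ b ∈ nxt, b ∈ nxt')
      ∧ (∀ s ∈ S', 0 ≤ a + s → a + s ≤ max_val → mval (max_val + 1) S (a + s) = ℓ + 1 → a + s ∈ nxt') := by
  intro S'
  induction S' with
  | nil =>
    intro hS' nxt hnxt hnd
    exact ⟨nxt, rfl, hnxt, hnd, fun b hb => hb, by simp⟩
  | cons s t ih =>
    intro hS' nxt hnxt hnd
    have hsS : s ∈ S := hS' s (by simp)
    have htS : ∀ x ∈ t, x ∈ S := fun x hx => hS' x (by simp [hx])
    simp only [List.foldl_cons]
    set b := a + s with hb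
    set g := fun i : ℕ => if mval (max_val + 1) S (i : Int) ≤ ℓ then mval (max_val + 1) S (i : Int) else if (i : Int) ∈ nxt then ℓ + 1 else max_val + 1 with hg
    by_cases hguard : 0 ≤ b ∧ b ≤ max_val ∧ PySem.List.pyGetD (stArr (max_val + 1).toNat g) b 0 = max_val + 1
    · -- fresh discovery
      obtain ⟨hb0, hbm, hcell⟩ := hguard
      have hbn : b.toNat < (max_val + 1).toNat := by omega
      have hcell' : g b.toNat = max_val + 1 := by
        rw [PySem.List.pyGetD_of_nonneg _ _ hb0, stArr_getD hbn] at hcell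
        exact hcell
      have hcast : ((b.toNat : ℕ) : Int) = b := by omega
      have hbig : ¬ (mval (max_val + 1) S b ≤ ℓ) ∧ b ∉ nxt := by
        by_contra hcon
        rw [hg] at hcell'
        simp only [hcast] at hcell'
        by_cases h1 : mval (max_val + 1) S b ≤ ℓ
        · rw [if_pos h1] at hcell'; omega
        · rw [if_neg h1] at hcell'
          by_cases h2 : b ∈ nxt
          · rw [if_pos h2] at hcell'; omega
          · exact hcon ⟨h1, h2⟩
      have hup : mval (max_val + 1) S b ≤ ℓ + 1 :=
        mval_succ_le hsS haP.2.2 (by omega)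
      have hbl : mval (max_val + 1) S b = ℓ + 1 := by
        have := hbig.1; omega
      have hstep : (if 0 ≤ b ∧ b ≤ max_val ∧ PySem.List.pyGetD (stArr (max_val + 1).toNat g) b 0 = max_val + 1 then
            (PySem.List.pySetD (stArr (max_val + 1).toNat g) b (ℓ + 1), nxt ++ [b])
          else (stArr (max_val + 1).toNat g, nxt))
          = (stArr (max_val + 1).toNat (fun i => if mval (max_val + 1) S (i : Int) ≤ ℓ then mval (max_val + 1) S (i : Int) else if (i : Int) ∈ nxt ++ [b] then ℓ + 1 else max_val + 1), nxt ++ [b]) := by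
        rw [if_pos ⟨hb0, hbm, hcell⟩]
        refine Prod.ext ?_ rfl
        rw [PySem.List.pySetD_of_nonneg _ _ hb0, stArr_set hbn]
        apply stArr_congr
        intro i hi
        dsimp only
        by_cases h : i = b.toNat
        · subst h
          rw [if_pos rfl, hcast]
          rw [if_neg (by omega), if_pos (by simp)]
        · rw [if_neg h]
          simp only [hg]
          have hib : (i : Int) ≠ b := by omega
          by_cases h1 : mval (max_val + 1) S (i : Int) ≤ ℓ
          · rw [if_pos h1, if_pos h1]
          · rw [if_neg h1, if_neg h1]
            by_cases h2 : (i : Int) ∈ nxt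
            · rw [if_pos h2, if_pos (by simp [h2])]
            · rw [if_neg h2, if_neg (by simp [h2, hib])]
      rw [hstep]
      have hnxt' : ∀ c ∈ nxt ++ [b], 0 ≤ c ∧ c ≤ max_val ∧ mval (max_val + 1) S c = ℓ + 1 := by
        intro c hc
        rcases List.mem_append.mp hc with h | h
        · exact hnxt c h
        · simp at h; subst h; exact ⟨hb0, hbm, hbl⟩
      have hdisj : nxt.Disjoint [b] := by
        intro x hx hxb
        rw [List.mem_singleton] at hxb
        subst hxb
        exact hbig.2 hx
      have hnd' : (nxt ++ [b]).Nodup := List.Nodup.append hnd (List.nodup_singleton b) hdisj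
      obtain ⟨nxt'', heq, hp1, hp2, hp3, hp4⟩ := ih htS (nxt ++ [b]) hnxt' hnd'
      refine ⟨nxt'', heq, hp1, hp2, ?_, ?_⟩
      · intro c hc; exact hp3 c (List.mem_append_left _ hc)
      · intro s' hs' h1 h2 h3
        rcases List.mem_cons.mp hs' with rfl | hs'
        · exact hp3 b (by simp)
        · exact hp4 s' hs' h1 h2 h3
    · -- nothing new
      rw [if_neg hguard]
      obtain ⟨nxt'', heq, hp1, hp2, hp3, hp4⟩ := ih htS nxt hnxt hnd
      refine ⟨nxt'', heq, hp1, hp2, hp3, ?_⟩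
      intro s' hs' h1 h2 h3
      rcases List.mem_cons.mp hs' with rfl | hs'
      · -- the guard failed although b is in range at level ℓ+1: so b was already in nxt
        rw [← hb] at h1 h2 h3
        have hbn : b.toNat < (max_val + 1).toNat := by omega
        have hcast : ((b.toNat : ℕ) : Int) = b := by omega
        have hcell : PySem.List.pyGetD (stArr (max_val + 1).toNat g) b 0 = g b.toNat := by
          rw [PySem.List.pyGetD_of_nonneg _ _ h1, stArr_getD hbn]
        have hne : g b.toNat ≠ max_val + 1 := by
          intro hcc
          exact hguard ⟨h1, h2, by rw [hcell, hcc]⟩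
        rw [hg] at hne
        simp only [hcast] at hne
        have hgt : ¬ (mval (max_val + 1) S b ≤ ℓ) := by omega
        rw [if_neg hgt] at hne
        by_cases h2' : b ∈ nxt
        · exact hp3 b h2'
        · rw [if_neg h2'] at hne; omega
      · exact hp4 s' hs' h1 h2 h3

-- the frontier scan of one BFS level
theorem bfs_frontier (max_val : Int) (S : List Int) (ℓ : Int) (hl0 : 0 ≤ ℓ) (hlm : ℓ < max_val) :
    ∀ (F : List Int), (∀ a ∈ F, 0 ≤ a ∧ a ≤ max_val ∧ mval (max_val + 1) S a = ℓ) →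
    ∀ (nxt : List Int), (∀ b ∈ nxt, 0 ≤ b ∧ b ≤ max_val ∧ mval (max_val + 1) S b = ℓ + 1) → nxt.Nodup →
    ∃ nxt' : List Int,
      F.foldl (fun (st2 : List Int × List Int) a =>
          S.foldl (fun (st2 : List Int × List Int) s =>
            if 0 ≤ a + s ∧ a + s ≤ max_val ∧ PySem.List.pyGetD st2.1 (a + s) 0 = max_val + 1 then
              (PySem.List.pySetD st2.1 (a + s) (ℓ + 1), st2.2 ++ [a + s])
            else st2) st2)
        (stArr (max_val + 1).toNat (fun i => if mval (max_val + 1) S (i : Int) ≤ ℓ then mval (max_val + 1) S (i : Int) else if (i : Int) ∈ nxt then ℓ + 1 else max_val + 1), nxt)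
      = (stArr (max_val + 1).toNat (fun i => if mval (max_val + 1) S (i : Int) ≤ ℓ then mval (max_val + 1) S (i : Int) else if (i : Int) ∈ nxt' then ℓ + 1 else max_val + 1), nxt')
      ∧ (∀ b ∈ nxt', 0 ≤ b ∧ b ≤ max_val ∧ mval (max_val + 1) S b = ℓ + 1) ∧ nxt'.Nodup
      ∧ (∀ b ∈ nxt, b ∈ nxt')
      ∧ (∀ a ∈ F, ∀ s ∈ S, 0 ≤ a + s → a + s ≤ max_val → mval (max_val + 1) S (a + s) = ℓ + 1 → a + s ∈ nxt') := by
  intro F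
  induction F with
  | nil =>
    intro hF nxt hnxt hnd
    exact ⟨nxt, rfl, hnxt, hnd, fun b hb => hb, by simp⟩
  | cons a F' ih =>
    intro hF nxt hnxt hnd
    simp only [List.foldl_cons]
    obtain ⟨nxt₁, heq1, h11, h12, h13, h14⟩ :=
      bfs_stamps max_val S ℓ hl0 hlm a (hF a (by simp)) S (fun s hs => hs) nxt hnxt hnd
    rw [heq1]
    obtain ⟨nxt₂, heq2, h21, h22, h23, h24⟩ :=
      ih (fun x hx => hF x (by simp [hx])) nxt₁ h11 h12
    refine ⟨nxt₂, heq2, h21, h22, fun b hb => h23 b (h13 b hb), ?_⟩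
    intro a' ha' s hs h1 h2 h3
    rcases List.mem_cons.mp ha' with rfl | ha'
    · exact h23 _ (h14 s hs h1 h2 h3)
    · exact h24 a' ha' s hs h1 h2 h3

-- B's outer loop over the BFS levels
theorem bfs_levels (max_val : Int) (S : List Int) (hS : ∀ s ∈ S, (0:Int) ≤ s) :
    ∀ (d : ℕ) (ℓ : Int) (F : List Int), 0 ≤ ℓ → ℓ + d = max_val →
    (∀ a, a ∈ F ↔ 0 ≤ a ∧ a ≤ max_val ∧ mval (max_val + 1) S a = ℓ) → F.Nodup →
    ((PySem.List.pyRange (ℓ + 1) (max_val + 1) 1).foldl (fun (st : List Int × List Int) level =>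
        st.2.foldl (fun (st2 : List Int × List Int) a =>
          S.foldl (fun (st2 : List Int × List Int) s =>
            if 0 ≤ a + s ∧ a + s ≤ max_val ∧ PySem.List.pyGetD st2.1 (a + s) 0 = max_val + 1 then
              (PySem.List.pySetD st2.1 (a + s) level, st2.2 ++ [a + s])
            else st2) st2) (st.1, ([] : List Int)))
      (stArr (max_val + 1).toNat (fun i => if mval (max_val + 1) S (i : Int) ≤ ℓ then mval (max_val + 1) S (i : Int) else max_val + 1), F)).1
    = stArr (max_val + 1).toNat (fun i => if mval (max_val + 1) S (i : Int) ≤ max_val then mval (max_val + 1) S (i : Int) else max_val + 1) := by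
  intro d
  induction d with
  | zero =>
    intro ℓ F hl0 hld hF hnd
    rw [PySem.List.pyRange_one_eq_nil (by omega), List.foldl_nil]
    have : ℓ = max_val := by omega
    subst this
    rfl
  | succ d ih =>
    intro ℓ F hl0 hld hF hnd
    rw [PySem.List.pyRange_one_cons (by omega), List.foldl_cons]
    have hlm : ℓ < max_val := by omega
    obtain ⟨nxt', heq, hp1, hp2, hp3, hp4⟩ :=
      bfs_frontier max_val S ℓ hl0 hlm F (fun a ha => (hF a).mp ha) [] (by simp) (by simp)
    have hmemfix : stArr (max_val + 1).toNat (fun i => if mval (max_val + 1) S (i : Int) ≤ ℓ then mval (max_val + 1) S (i : Int) else if (i : Int) ∈ ([] : List Int) then ℓ + 1 else max_val + 1)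
        = stArr (max_val + 1).toNat (fun i => if mval (max_val + 1) S (i : Int) ≤ ℓ then mval (max_val + 1) S (i : Int) else max_val + 1) := by
      apply stArr_congr; intro i hi; dsimp only; simp
    dsimp only
    rw [← hmemfix, heq]
    -- nxt' is exactly the set of amounts at level ℓ+1
    have hnxt'iff : ∀ a, a ∈ nxt' ↔ 0 ≤ a ∧ a ≤ max_val ∧ mval (max_val + 1) S a = ℓ + 1 := by
      intro a
      constructor
      · exact hp1 a
      · rintro ⟨h1, h2, h3⟩
        -- attainment: a = a' + s with mval a' = ℓ
        have ha1 : 1 ≤ a := by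
          rcases lt_or_ge 0 a with h | h
          · omega
          · exfalso
            have : a = 0 := by omega
            subst this
            rw [mval_zero S (by omega)] at h3
            omega
        rcases mval_attained (M := max_val + 1) hS (a := a) ha1 (by omega) with hM | ⟨s, hsS, hs1, hsa, heq'⟩
        · omega
        · have hml : mval (max_val + 1) S (a - s) = ℓ := by omega
          have hmemF : (a - s) ∈ F := (hF (a - s)).mpr ⟨by omega, by omega, hml⟩
          have := hp4 (a - s) hmemF s hsS (by omega) (by simpa using h2) (by simpa using h3)
          simpa using this
    have harr : stArr (max_val + 1).toNat (fun i => if mval (max_val + 1) S (i : Int) ≤ ℓ then mval (max_val + 1) S (i : Int) else if (i : Int) ∈ nxt' then ℓ + 1 else max_val + 1)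
        = stArr (max_val + 1).toNat (fun i => if mval (max_val + 1) S (i : Int) ≤ ℓ + 1 then mval (max_val + 1) S (i : Int) else max_val + 1) := by
      apply stArr_congr
      intro i hi
      dsimp only
      by_cases h1 : mval (max_val + 1) S (i : Int) ≤ ℓ
      · rw [if_pos h1, if_pos (by omega)]
      · rw [if_neg h1]
        by_cases h2 : (i : Int) ∈ nxt'
        · obtain ⟨-, -, h3⟩ := (hnxt'iff _).mp h2
          rw [if_pos h2, if_pos (by omega), h3]
        · rw [if_neg h2]
          have : ¬ (mval (max_val + 1) S (i : Int) ≤ ℓ + 1) := by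
            intro hle
            have h3 : mval (max_val + 1) S (i : Int) = ℓ + 1 := by omega
            exact h2 ((hnxt'iff _).mpr ⟨by omega, by omega, h3⟩)
          rw [if_neg this]
    rw [harr]
    exact ih (ℓ + 1) nxt' (by omega) (by omega) hnxt'iff hp2

-- ===== VERDICT (by name: the statement is the Claim_ definition above) =====
theorem get_min_counts_spec : Claim_equal_get_min_counts := by
  intro max_val stamps _ hpre
  unfold Spec_get_min_counts
  obtain ⟨hmv, hcase⟩ := hpre
  by_cases hnn : ∀ s ∈ stamps, (0:Int) ≤ s
  · -- main path: every stamp is nonnegative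
    have hn1 : 1 ≤ (max_val + 1).toNat := by omega
    have hA : get_min_counts max_val stamps
        = stArr (max_val + 1).toNat (fun i => mval (max_val + 1) stamps (i : Int)) := by
      unfold get_min_counts
      dsimp only
      rw [init_eq _ _ hn1]
      rw [stArr_congr (g := fun i => if (i : Int) < 1 then mval (max_val + 1) stamps (i : Int) else max_val + 1)
          (by intro i hi
              by_cases h : i = 0
              · subst h
                simp only [Nat.cast_zero]
                rw [mval_zero _ (by omega)]
                norm_num
              · simp only [if_neg h]
                rw [if_neg (by omega)])]
      exact outerA max_val stamps hnn max_val.toNat 1 le_rfl (by omega)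
    have hB : get_min_counts_alt max_val stamps
        = stArr (max_val + 1).toNat (fun i => mval (max_val + 1) stamps (i : Int)) := by
      unfold get_min_counts_alt
      dsimp only
      rw [init_eq _ _ hn1]
      rw [stArr_congr (g := fun i => if mval (max_val + 1) stamps (i : Int) ≤ 0 then mval (max_val + 1) stamps (i : Int) else max_val + 1)
          (by intro i hi
              by_cases h : i = 0
              · subst h
                simp only [Nat.cast_zero]
                rw [mval_zero _ (by omega)]
                simp
              · simp only [if_neg h]
                have : ¬ (mval (max_val + 1) stamps (i : Int) ≤ 0) := by
                  intro hle
                  have := mval_eq_zero (M := max_val + 1) (by omega) hle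
                  omega
                rw [if_neg this])]
      have hF : ∀ a : Int, a ∈ ([0] : List Int) ↔ 0 ≤ a ∧ a ≤ max_val ∧ mval (max_val + 1) stamps a = 0 := by
        intro a
        constructor
        · intro ha
          simp at ha; subst ha
          exact ⟨le_rfl, hmv, mval_zero _ (by omega)⟩
        · rintro ⟨h1, h2, h3⟩
          have := mval_eq_zero (M := max_val + 1) (by omega) (le_of_eq h3)
          simp [this]
      have := bfs_levels max_val stamps hnn max_val.toNat 0 [0] le_rfl (by omega) hF (by simp)
      simp only [zero_add] at this
      rw [this]
      apply stArr_congr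
      intro i hi
      dsimp only
      rcases mval_cases (M := max_val + 1) hnn ((i : ℕ) : Int) with h | h
      · by_cases h2 : mval (max_val + 1) stamps (i : Int) ≤ max_val
        · rw [if_pos h2]
        · rw [if_neg h2, h]
      · rw [if_pos (by omega)]
    rw [hA, hB]
  · -- a negative stamp is admitted only when max_val = 0: both programs return [0]
    have hmv0 : max_val = 0 := by
      rcases hcase with h | h
      · exact h
      · exact absurd h hnn
    subst hmv0
    have hA : get_min_counts 0 stamps
        = PySem.List.pySetD (List.replicate ((0:Int) + 1).toNat ((0:Int) + 1)) 0 0 := by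
      unfold get_min_counts
      dsimp only
      rw [PySem.List.pyRange_one_eq_nil (by norm_num), List.foldl_nil]
    have hB : get_min_counts_alt 0 stamps
        = PySem.List.pySetD (List.replicate ((0:Int) + 1).toNat ((0:Int) + 1)) 0 0 := by
      unfold get_min_counts_alt
      dsimp only
      rw [PySem.List.pyRange_one_eq_nil (by norm_num), List.foldl_nil]
    rw [hA, hB]
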